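-- pv_equiv track=rewrite | github.com/Kulak-Informatica/Python | Oefeningen/14 - sets/taal.py | perfect_woord
-- ===== SOURCE A (Python) =====
-- def perfect_woord(zin, set):
--     lijst = []
--     for letter in zin:
--         if letter == ' ' or (letter not in lijst and letter in set):
--             lijst.append(letter)
--         else:
--             return False
--     return True
-- ===== SOURCE B (Python) =====
-- def perfect_woord(zin, set):
--     letters = [c for c in zin if c != ' ']
--     return all(c in set for c in letters) and len(dict.fromkeys(letters)) == len(letters)
-- ===== Notes on version B (the rewrite author's own statement) =====
-- stated objective: simpler
-- what changed: Replaces the early-return loop with an incremental seen-list by two aggregate passes: a comprehension collecting non-space letters, an all() membership test, and a dedup-length comparison for uniqueness.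
import Mathlib
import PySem

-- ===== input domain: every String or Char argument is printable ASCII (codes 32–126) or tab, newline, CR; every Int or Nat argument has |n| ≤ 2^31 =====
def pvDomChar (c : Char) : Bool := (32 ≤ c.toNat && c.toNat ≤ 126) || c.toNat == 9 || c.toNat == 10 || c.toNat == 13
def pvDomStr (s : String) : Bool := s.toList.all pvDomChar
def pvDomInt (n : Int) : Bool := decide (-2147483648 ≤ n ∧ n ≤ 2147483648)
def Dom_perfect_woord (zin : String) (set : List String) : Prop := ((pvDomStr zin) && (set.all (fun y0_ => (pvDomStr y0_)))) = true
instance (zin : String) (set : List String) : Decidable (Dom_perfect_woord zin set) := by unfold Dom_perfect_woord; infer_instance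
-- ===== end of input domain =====

-- B differs from A structurally: A scans with an early return and an incremental seen-list;
-- B collects the non-space letters once, then checks membership with one aggregate pass and
-- uniqueness by a dedup-length comparison. Objective: simpler.

-- ===== PORT A =====
-- the for-loop of A with its accumulator `lijst` and early `return False`
def perfect_woord_loop (cs : List Char) (lijst : List Char) (set : List String) : Bool :=
  match cs with
  | [] => true
  | letter :: rest =>
    if letter == ' ' || (!(lijst.contains letter) && set.contains (String.singleton letter)) then
      perfect_woord_loop rest (lijst ++ [letter]) set
    else
      false

def perfect_woord (zin : String) (set : List String) : Bool :=
  perfect_woord_loop zin.toList [] set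

-- ===== PORT B =====
def perfect_woord_alt (zin : String) (set : List String) : Bool :=
  let letters := zin.toList.filter (fun c => c != ' ')
  letters.all (fun c => set.contains (String.singleton c))
    && ((PySem.List.dedup letters).length == letters.length)

-- ===== PRECONDITION & SPEC =====
def Spec_perfect_woord (zin : String) (set : List String) (out : Bool) : Prop := out = perfect_woord_alt zin set
instance (zin : String) (set : List String) (out : Bool) : Decidable (Spec_perfect_woord zin set out) := by unfold Spec_perfect_woord; infer_instance

-- ===== CLAIM (what is proved, stated in full; the proofs are below) =====
def Claim_equal_perfect_woord : Prop := ∀ (zin : String) (set : List String), Dom_perfect_woord zin set → Spec_perfect_woord zin set (perfect_woord zin set)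

-- ===== LEMMAS AND PROOFS =====

-- dedup keeps first occurrences; its length equals the list's length iff the list has no duplicates
theorem dedup_length_eq_iff {α : Type} [DecidableEq α] (ls : List α) :
    (PySem.List.dedup ls).length = ls.length ↔ ls.Nodup := by
  have hlen : (PySem.List.dedup ls).length = ls.dedup.length := by
    rw [PySem.List.dedup_eq_ofList]
    have h1 : (PySem.Set.ofList ls).toFinset = ls.toFinset := by
      ext a; simp [List.mem_toFinset, PySem.Set.mem_ofList]
    have h2 := List.toFinset_card_of_nodup (PySem.Set.nodup_ofList (xs := ls))
    rw [← h2, h1, List.card_toFinset]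
  rw [hlen]
  constructor
  · intro h
    have hsub := List.dedup_sublist ls
    have heq := hsub.eq_of_length h
    exact heq ▸ List.nodup_dedup ls
  · intro h
    rw [List.dedup_eq_self.2 h]

theorem loop_char (cs : List Char) (seen : List Char) (set : List String) :
    perfect_woord_loop cs seen set = true ↔
      ((∀ c ∈ cs.filter (fun c => c != ' '), set.contains (String.singleton c) = true) ∧
       (cs.filter (fun c => c != ' ')).Nodup ∧
       (∀ c ∈ cs.filter (fun c => c != ' '), c ∉ seen)) := by
  induction cs generalizing seen with
  | nil => simp [perfect_woord_loop]
  | cons c rest ih =>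
    by_cases hc : c = ' '
    · subst hc
      have hf : List.filter (fun c => c != ' ') (' ' :: rest) = List.filter (fun c => c != ' ') rest := by
        simp
      simp only [perfect_woord_loop, beq_self_eq_true, Bool.true_or, if_true, hf]
      rw [ih]
      constructor
      · rintro ⟨h1, h2, h3⟩
        exact ⟨h1, h2, fun d hd hmem => h3 d hd (List.mem_append.2 (Or.inl hmem))⟩
      · rintro ⟨h1, h2, h3⟩
        refine ⟨h1, h2, fun d hd hmem => ?_⟩
        have hd' : d ≠ ' ' := by
          have := List.of_mem_filter hd; simpa using this
        rcases List.mem_append.1 hmem with h | h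
        · exact h3 d hd h
        · simp at h; exact hd' h
    · simp only [perfect_woord_loop, List.filter_cons]
      have hcb : (c == ' ') = false := by simp [hc]
      simp only [hcb, Bool.false_or, bne_iff_ne, ne_eq, hc, not_false_iff, if_true]
      by_cases hcond : (!(seen.contains c) && set.contains (String.singleton c)) = true
      · simp only [hcond, if_true]
        rw [ih]
        simp only [Bool.and_eq_true, Bool.not_eq_true', List.contains_eq_mem, decide_eq_false_iff_not] at hcond
        obtain ⟨hnseen, hset⟩ := hcond
        constructor
        · rintro ⟨h1, h2, h3⟩
          refine ⟨?_, ?_, ?_⟩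
          · intro d hd
            rcases List.mem_cons.1 hd with h | h
            · subst h; simpa using hset
            · exact h1 d h
          · refine List.nodup_cons.2 ⟨?_, h2⟩
            intro hmem
            exact (h3 c hmem) (by simp)
          · intro d hd
            rcases List.mem_cons.1 hd with h | h
            · subst h; exact hnseen
            · intro hmem; exact h3 d h (by simp [hmem])
        · rintro ⟨h1, h2, h3⟩
          obtain ⟨hcnot, h2'⟩ := List.nodup_cons.1 h2
          refine ⟨fun d hd => h1 d (by simp [hd]), h2', fun d hd => ?_⟩
          intro hmem
          rcases List.mem_append.1 hmem with h | h
          · exact h3 d (by simp [hd]) h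
          · simp at h; subst h; exact hcnot hd
      · simp only [hcond]
        simp only [Bool.and_eq_true, Bool.not_eq_true', List.contains_eq_mem, decide_eq_false_iff_not, not_and_or] at hcond
        constructor
        · intro h; cases h
        · rintro ⟨h1, h2, h3⟩
          exfalso
          have hcmem : c ∈ c :: List.filter (fun c => c != ' ') rest := by
            simp
          rcases hcond with h | h
          · rw [not_not] at h
            exact (h3 c hcmem) h
          · exact h (by simpa using h1 c hcmem)

-- ===== VERDICT (by name: the statement is the Claim_ definition above) =====
theorem perfect_woord_spec : Claim_equal_perfect_woord := by
  intro zin set _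
  unfold Spec_perfect_woord perfect_woord perfect_woord_alt
  rw [Bool.eq_iff_iff]
  rw [loop_char]
  simp only [Bool.and_eq_true, List.all_eq_true, beq_iff_eq]
  rw [dedup_length_eq_iff]
  constructor
  · rintro ⟨h1, h2, _⟩; exact ⟨h1, h2⟩
  · rintro ⟨h1, h2⟩; exact ⟨h1, h2, by simp⟩
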